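-- pv_equiv track=rewrite | github.com/HZSRTItem/hz-python-remote-sensing | RUN/GLI.py | getXYIndex
-- ===== SOURCE A (Python) =====
-- def getXYIndex(fields):
--     i_x, i_y = -1, -1
--     for i in range(len(fields)):
--         if "x" == fields[i].lower():
--             i_x = i
--         if "y" == fields[i].lower():
--             i_y = i
--     return i_x, i_y
-- ===== SOURCE B (Python) =====
-- def getXYIndex(fields):
--     # Different strategy: search the reversed lowercased list for the FIRST
--     # occurrence of each target (= last occurrence in the original), via .index.
--     low = [f.lower() for f in fields]
--     rev = low[::-1]
--     n = len(low)
--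
--     def last(t):
--         try:
--             return n - 1 - rev.index(t)
--         except ValueError:
--             return -1
--
--     return last("x"), last("y")
-- ===== Notes on version B (the rewrite author's own statement) =====
-- stated objective: alternative
-- what changed: Instead of one index loop updating two conditional accumulators (last write wins), B lowercases once, reverses the list, and computes each answer as a first-match search (.index) on the reversed list, converting the reversed position back with n-1-j.
import Mathlib
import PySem

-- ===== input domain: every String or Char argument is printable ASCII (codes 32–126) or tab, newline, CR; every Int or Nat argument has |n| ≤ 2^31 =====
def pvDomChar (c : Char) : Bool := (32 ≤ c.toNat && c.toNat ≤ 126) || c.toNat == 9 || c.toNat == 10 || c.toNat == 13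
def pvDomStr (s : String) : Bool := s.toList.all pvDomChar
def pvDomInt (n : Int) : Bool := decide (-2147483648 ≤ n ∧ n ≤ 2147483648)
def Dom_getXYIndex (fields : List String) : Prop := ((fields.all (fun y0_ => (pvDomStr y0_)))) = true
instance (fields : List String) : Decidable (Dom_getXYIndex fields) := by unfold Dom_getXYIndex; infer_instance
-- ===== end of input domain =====

-- B replaces A's forward index loop with two conditional accumulators by a
-- lowercase-once, reverse, first-match (.index) search per target (alternative).

-- ===== PORT A =====
def getXYIndex (fields : List String) : Int × Int :=
  (PySem.List.pyRange 0 (PySem.List.len fields) 1).foldl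
    (fun (st : Int × Int) i =>
      let ix := if "x" == PySem.Str.lower (PySem.List.pyGetD fields i "") then i else st.1
      let iy := if "y" == PySem.Str.lower (PySem.List.pyGetD fields i "") then i else st.2
      (ix, iy)) (-1, -1)

-- ===== PORT B =====
-- Source B's nested helper 'last': first match of t in the reversed list, mapped back.
def pvLastIdx (n : Int) (rev : List String) (t : String) : Int :=
  match PySem.List.index? rev t with
  | some j => n - 1 - (j : Int)
  | none => -1

def getXYIndex_alt (fields : List String) : Int × Int :=
  let low := fields.map PySem.Str.lower
  let rev := low.reverse   -- low[::-1] (exact: PySem.List.slice?_none_none_neg_one)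
  let n := PySem.List.len low
  (pvLastIdx n rev "x", pvLastIdx n rev "y")

-- ===== PRECONDITION & SPEC =====
def Spec_getXYIndex (fields : List String) (out : Int × Int) : Prop := out = getXYIndex_alt fields
instance (fields : List String) (out : Int × Int) : Decidable (Spec_getXYIndex fields out) := by unfold Spec_getXYIndex; infer_instance

-- ===== CLAIM (what is proved, stated in full; the proofs are below) =====
def Claim_equal_getXYIndex : Prop := ∀ (fields : List String), Dom_getXYIndex fields → Spec_getXYIndex fields (getXYIndex fields)

-- ===== LEMMAS AND PROOFS =====

-- A's index loop, rewritten as a fold over the (index, field) pairs.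
theorem pv_A_enum (fields : List String) : getXYIndex fields =
    (PySem.List.enumerate fields 0).foldl
      (fun (st : Int × Int) p =>
        (if "x" == PySem.Str.lower p.2 then p.1 else st.1,
         if "y" == PySem.Str.lower p.2 then p.1 else st.2)) (-1, -1) := by
  unfold getXYIndex
  rw [PySem.List.enumerate_eq_map_pyRange (d := ""), List.foldl_map]

-- Appending one field to B's input: the new field wins if it matches, else unchanged.
theorem pv_alt_append (fields : List String) (f : String) :
    getXYIndex_alt (fields ++ [f]) =
      (if "x" == PySem.Str.lower f then (fields.length : Int) else (getXYIndex_alt fields).1,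
       if "y" == PySem.Str.lower f then (fields.length : Int) else (getXYIndex_alt fields).2) := by
  have hrev : ((fields ++ [f]).map PySem.Str.lower).reverse
      = PySem.Str.lower f :: (fields.map PySem.Str.lower).reverse := by simp
  have hlen : PySem.List.len ((fields ++ [f]).map PySem.Str.lower)
      = PySem.List.len (fields.map PySem.Str.lower) + 1 := by
    simp [PySem.List.len]
  have key : ∀ t : String,
      pvLastIdx (PySem.List.len ((fields ++ [f]).map PySem.Str.lower))
        (((fields ++ [f]).map PySem.Str.lower).reverse) t =
      (if t == PySem.Str.lower f then (fields.length : Int)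
       else pvLastIdx (PySem.List.len (fields.map PySem.Str.lower))
              ((fields.map PySem.Str.lower).reverse) t) := by
    intro t
    rw [hrev, hlen]
    by_cases h : PySem.Str.lower f = t
    · subst h
      simp only [pvLastIdx]
      rw [PySem.List.index?_cons_self]
      simp [PySem.List.len]
    · simp only [pvLastIdx]
      rw [PySem.List.index?_cons_of_ne _ h]
      rw [if_neg (fun hc => h ((beq_iff_eq.mp hc)).symm)]
      cases hj : PySem.List.index? ((fields.map PySem.Str.lower).reverse) t with
      | none => rfl
      | some j =>
        simp only [Option.map_some]
        push_cast
        ring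
  show (pvLastIdx _ _ "x", pvLastIdx _ _ "y") = _
  rw [key "x", key "y"]
  rfl

theorem pv_main (fields : List String) : getXYIndex fields = getXYIndex_alt fields := by
  rw [pv_A_enum]
  induction fields using List.reverseRecOn with
  | nil => decide
  | append_singleton fields f ih =>
    rw [PySem.List.enumerate_append, List.foldl_append, ih, pv_alt_append]
    simp [PySem.List.enumerate]

-- ===== VERDICT (by name: the statement is the Claim_ definition above) =====
theorem getXYIndex_spec : Claim_equal_getXYIndex := by
  intro fields _
  unfold Spec_getXYIndex
  exact pv_main fields
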